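-- pv_equiv track=rewrite | github.com/MattiaSalve/KOFScraper | ARGUS/spiders/dualspider.py | reorderUrlstack
-- ===== SOURCE A (Python) =====
-- def reorderUrlstack(urlstack, language, prefer_short_urls):
--     preferred_language = []
--     other_language = []
--     language_tags = []
--     if language == "None":
--         preferred_language = urlstack
--     else:
--         for ISO in language:
--             language_tags.append("/{}/".format(ISO))
--             language_tags.append("/{}-{}/".format(ISO, ISO))
--             language_tags.append("?lang={}".format(ISO))
--         for url in urlstack:
--             if any(tag in url for tag in language_tags):
--                 preferred_language.append(url)
--             else:
--                 other_language.append(url)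
--     if prefer_short_urls == "on":
--         urlstack = sorted(preferred_language, key=len) + sorted(
--             other_language, key=len
--         )
--     else:
--         urlstack = preferred_language + other_language
--     return urlstack
-- ===== SOURCE B (Python) =====
-- def reorderUrlstack(urlstack, language, prefer_short_urls):
--     if language == "None":
--         tags = None
--     else:
--         tags = [
--             t
--             for ISO in language
--             for t in ("/{}/".format(ISO), "/{}-{}/".format(ISO, ISO), "?lang={}".format(ISO))
--         ]
--
--     def group(url):
--         if tags is None:
--             return 0
--         return 0 if any(tag in url for tag in tags) else 1
--
--     if prefer_short_urls == "on":
--         return sorted(urlstack, key=lambda u: (group(u), len(u)))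
--     return sorted(urlstack, key=group)
-- ===== Notes on version B (the rewrite author's own statement) =====
-- stated objective: alternative
-- what changed: Replaces the two-list partition loop, two separate sorts and concatenation by a single stable sorted() call over urlstack keyed by a 0/1 group flag (paired with len(url) when prefer_short_urls=='on'); sort stability reproduces the original within-group order.
import Mathlib
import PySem

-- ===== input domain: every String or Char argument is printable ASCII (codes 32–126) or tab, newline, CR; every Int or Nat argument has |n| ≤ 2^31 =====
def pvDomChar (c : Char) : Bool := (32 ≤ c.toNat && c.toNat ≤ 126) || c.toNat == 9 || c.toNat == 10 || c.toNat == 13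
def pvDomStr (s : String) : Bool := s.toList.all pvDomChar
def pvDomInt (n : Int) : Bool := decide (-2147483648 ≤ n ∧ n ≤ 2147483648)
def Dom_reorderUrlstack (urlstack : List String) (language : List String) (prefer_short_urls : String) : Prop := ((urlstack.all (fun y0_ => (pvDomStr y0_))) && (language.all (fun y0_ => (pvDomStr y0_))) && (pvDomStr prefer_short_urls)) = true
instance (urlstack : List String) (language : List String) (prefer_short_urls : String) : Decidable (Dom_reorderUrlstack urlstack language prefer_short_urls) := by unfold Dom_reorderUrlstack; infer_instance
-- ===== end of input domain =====

-- B replaces A's two-list partition + two sorts + concatenation by one stable keyed sort (alternative decomposition, same cost).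


-- ===== PORT A =====
-- `language == "None"` compares a list[str] with a str: in Python that is always False on the
-- typed domain (language : List String), so only the else branch is reachable and is ported.
def reorderUrlstack (urlstack : List String) (language : List String) (prefer_short_urls : String) : List String :=
  let language_tags : List String :=
    language.foldl (fun tags ISO =>
      tags ++ ["/" ++ ISO ++ "/"] ++ ["/" ++ ISO ++ "-" ++ ISO ++ "/"] ++ ["?lang=" ++ ISO]) []
  let part :=
    urlstack.foldl (fun acc url =>
      if language_tags.any (fun tag => PySem.Str.isIn tag url) then (acc.1 ++ [url], acc.2)
      else (acc.1, acc.2 ++ [url])) ([], [])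
  let preferred_language := part.1
  let other_language := part.2
  if prefer_short_urls == "on" then
    PySem.List.sorted preferred_language (fun u => PySem.Str.len u) ++
      PySem.List.sorted other_language (fun u => PySem.Str.len u)
  else
    preferred_language ++ other_language

-- ===== PORT B =====
-- `language == "None"` is likewise always False here, so `tags` is always the comprehension.
def reorderUrlstack_alt (urlstack : List String) (language : List String) (prefer_short_urls : String) : List String :=
  let tags : List String :=
    language.flatMap (fun ISO => ["/" ++ ISO ++ "/", "/" ++ ISO ++ "-" ++ ISO ++ "/", "?lang=" ++ ISO])
  let group : String → Int := fun url => if tags.any (fun tag => PySem.Str.isIn tag url) then 0 else 1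
  if prefer_short_urls == "on" then
    PySem.List.sorted2 urlstack group (fun u => PySem.Str.len u) false
  else
    PySem.List.sorted urlstack group false

-- ===== PRECONDITION & SPEC =====
def Spec_reorderUrlstack (urlstack : List String) (language : List String) (prefer_short_urls : String) (out : List String) : Prop := out = reorderUrlstack_alt urlstack language prefer_short_urls
instance (urlstack : List String) (language : List String) (prefer_short_urls : String) (out : List String) : Decidable (Spec_reorderUrlstack urlstack language prefer_short_urls out) := by unfold Spec_reorderUrlstack; infer_instance

-- ===== CLAIM (what is proved, stated in full; the proofs are below) =====
def Claim_equal_reorderUrlstack : Prop := ∀ (urlstack : List String) (language : List String) (prefer_short_urls : String), Dom_reorderUrlstack urlstack language prefer_short_urls → Spec_reorderUrlstack urlstack language prefer_short_urls (reorderUrlstack urlstack language prefer_short_urls)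

-- ===== LEMMAS AND PROOFS =====

theorem insertBy_congr_mem {α : Type} (b1 b2 : α → α → Bool) (x : α) (ys : List α)
    (h : ∀ y ∈ ys, b1 x y = b2 x y) :
    PySem.List.insertBy b1 x ys = PySem.List.insertBy b2 x ys := by
  induction ys with
  | nil => rfl
  | cons y t ih =>
    simp only [PySem.List.insertBy, h y (by simp)]
    split <;> simp [ih (fun z hz => h z (by simp [hz]))]

theorem insertBy_split_left {α : Type} (bf bl : α → α → Bool) (x : α) (l1 l2 : List α)
    (h1 : ∀ y ∈ l1, bf x y = bl x y) (h2 : ∀ y ∈ l2, bf x y = true) :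
    PySem.List.insertBy bf x (l1 ++ l2) = PySem.List.insertBy bl x l1 ++ l2 := by
  induction l1 with
  | nil =>
    cases l2 with
    | nil => rfl
    | cons y t => simp [PySem.List.insertBy, h2 y (by simp)]
  | cons y t ih =>
    simp only [List.cons_append, PySem.List.insertBy, h1 y (by simp)]
    split <;> simp [ih (fun z hz => h1 z (by simp [hz]))]

theorem insertBy_split_right {α : Type} (bf br : α → α → Bool) (x : α) (l1 l2 : List α)
    (h1 : ∀ y ∈ l1, bf x y = false) (h2 : ∀ y ∈ l2, bf x y = br x y) :
    PySem.List.insertBy bf x (l1 ++ l2) = l1 ++ PySem.List.insertBy br x l2 := by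
  induction l1 with
  | nil => simpa using insertBy_congr_mem bf br x l2 h2
  | cons y t ih =>
    simp only [List.cons_append, PySem.List.insertBy, h1 y (by simp)]
    simp [ih (fun z hz => h1 z (by simp [hz]))]

theorem sorted_append_singleton {α κ : Type} [LT κ] [DecidableLT κ] (xs : List α) (x : α) (key : α → κ) :
    PySem.List.sorted (xs ++ [x]) key false =
      PySem.List.insertBy (fun a b => decide (key a < key b)) x (PySem.List.sorted xs key false) := by
  rw [PySem.List.sorted_eq_foldl_insertBy, PySem.List.sorted_eq_foldl_insertBy, List.foldl_append]
  rfl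

theorem sorted2_append_singleton {α κ₁ κ₂ : Type} [LT κ₁] [DecidableLT κ₁] [LT κ₂] [DecidableLT κ₂]
    (xs : List α) (x : α) (k1 : α → κ₁) (k2 : α → κ₂) :
    PySem.List.sorted2 (xs ++ [x]) k1 k2 false =
      PySem.List.insertBy
        (fun a b => decide (k1 a < k1 b) || (!decide (k1 b < k1 a) && decide (k2 a < k2 b))) x
        (PySem.List.sorted2 xs k1 k2 false) := by
  simp [PySem.List.sorted2, List.foldl_append]

-- A stable sort by a 0/1 group key is exactly the partition.
theorem sorted_group_partition {α : Type} (p : α → Bool) (xs : List α) :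
    PySem.List.sorted xs (fun x => if p x then (0 : Int) else 1) false =
      xs.filter p ++ xs.filter (fun x => !p x) := by
  induction xs using List.reverseRecOn with
  | nil => rfl
  | append_singleton xs x ih =>
    rw [sorted_append_singleton, ih, List.filter_append, List.filter_append]
    cases hx : p x with
    | true =>
      rw [insertBy_split_left _ (fun _ _ => false) x _ _
            (fun y hy => by
              have hpy : p y = true := (List.mem_filter.mp hy).2
              simp [hpy, hx])
            (fun y hy => by
              have hpy : p y = false := by simpa using (List.mem_filter.mp hy).2
              simp [hpy, hx]),
          PySem.List.insertBy_of_forall_not_before _ _ _ (fun _ _ => rfl)]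
      simp [hx]
    | false =>
      rw [insertBy_split_right _ (fun _ _ => false) x _ _
            (fun y hy => by
              have hpy : p y = true := (List.mem_filter.mp hy).2
              simp [hpy, hx])
            (fun y hy => by
              have hpy : p y = false := by simpa using (List.mem_filter.mp hy).2
              simp [hpy, hx]),
          PySem.List.insertBy_of_forall_not_before _ _ _ (fun _ _ => rfl)]
      simp [hx]

-- A stable sort by (0/1 group, k2) is the two per-group sorts concatenated.
theorem sorted2_group_partition {α κ : Type} [LinearOrder κ] (p : α → Bool) (k2 : α → κ) (xs : List α) :
    PySem.List.sorted2 xs (fun x => if p x then (0 : Int) else 1) k2 false =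
      PySem.List.sorted (xs.filter p) k2 false ++
        PySem.List.sorted (xs.filter (fun x => !p x)) k2 false := by
  induction xs using List.reverseRecOn with
  | nil => rfl
  | append_singleton xs x ih =>
    rw [sorted2_append_singleton, ih, List.filter_append, List.filter_append]
    cases hx : p x with
    | true =>
      rw [insertBy_split_left _ (fun a b => decide (k2 a < k2 b)) x _ _
            (fun y hy => by
              have hpy : p y = true :=
                (List.mem_filter.mp ((PySem.List.mem_sorted _ _ _ _).mp hy)).2
              simp [hpy, hx])
            (fun y hy => by
              have hpy : p y = false := by
                simpa using (List.mem_filter.mp ((PySem.List.mem_sorted _ _ _ _).mp hy)).2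
              simp [hpy, hx]),
          ← sorted_append_singleton]
      simp [hx]
    | false =>
      rw [insertBy_split_right _ (fun a b => decide (k2 a < k2 b)) x _ _
            (fun y hy => by
              have hpy : p y = true :=
                (List.mem_filter.mp ((PySem.List.mem_sorted _ _ _ _).mp hy)).2
              simp [hpy, hx])
            (fun y hy => by
              have hpy : p y = false := by
                simpa using (List.mem_filter.mp ((PySem.List.mem_sorted _ _ _ _).mp hy)).2
              simp [hpy, hx]),
          ← sorted_append_singleton]
      simp [hx]

-- A's two-list append loop is the partition by the test.
theorem foldl_partition {α : Type} (p : α → Bool) (xs : List α) (pr ot : List α) :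
    xs.foldl (fun acc url => if p url then (acc.1 ++ [url], acc.2) else (acc.1, acc.2 ++ [url])) (pr, ot) =
      (pr ++ xs.filter p, ot ++ xs.filter (fun x => !p x)) := by
  induction xs generalizing pr ot with
  | nil => simp
  | cons x t ih =>
    cases hx : p x <;> simp [hx, ih]

-- A's tag-building loop equals B's flatMap comprehension.
theorem tags_eq (language : List String) :
    language.foldl (fun tags ISO =>
        tags ++ ["/" ++ ISO ++ "/"] ++ ["/" ++ ISO ++ "-" ++ ISO ++ "/"] ++ ["?lang=" ++ ISO]) [] =
      language.flatMap (fun ISO => ["/" ++ ISO ++ "/", "/" ++ ISO ++ "-" ++ ISO ++ "/", "?lang=" ++ ISO]) := by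
  calc language.foldl (fun tags ISO =>
        tags ++ ["/" ++ ISO ++ "/"] ++ ["/" ++ ISO ++ "-" ++ ISO ++ "/"] ++ ["?lang=" ++ ISO]) []
      = language.foldl (fun acc ISO =>
        acc ++ ["/" ++ ISO ++ "/", "/" ++ ISO ++ "-" ++ ISO ++ "/", "?lang=" ++ ISO]) [] :=
      by
        apply PySem.List.foldl_congr_mem
        intro acc x _
        simp
    _ = [] ++ language.flatMap (fun ISO => ["/" ++ ISO ++ "/", "/" ++ ISO ++ "-" ++ ISO ++ "/", "?lang=" ++ ISO]) :=
      PySem.List.foldl_append_eq_flatMap _ language []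
    _ = _ := by simp

-- ===== VERDICT (by name: the statement is the Claim_ definition above) =====
theorem reorderUrlstack_spec : Claim_equal_reorderUrlstack := by
  intro urlstack language prefer_short_urls _
  show reorderUrlstack urlstack language prefer_short_urls = reorderUrlstack_alt urlstack language prefer_short_urls
  unfold reorderUrlstack reorderUrlstack_alt
  simp only [tags_eq]
  rw [foldl_partition (fun url =>
    (language.flatMap (fun ISO => ["/" ++ ISO ++ "/", "/" ++ ISO ++ "-" ++ ISO ++ "/", "?lang=" ++ ISO])).any
      (fun tag => PySem.Str.isIn tag url)) urlstack [] []]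
  cases prefer_short_urls == "on"
  · simp only [Bool.false_eq_true, if_false, List.nil_append]
    exact (sorted_group_partition _ urlstack).symm
  · simp only [if_true, List.nil_append]
    exact (sorted2_group_partition _ (fun u => PySem.Str.len u) urlstack).symm
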